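-- pv_equiv track=rewrite | github.com/Aarushi-Pandey/advent-of-code-2024 | 7/1.py | recur_check_result_possible
-- ===== SOURCE A (Python) =====
-- def recur_check_result_possible(res, curr_calc, inp, chosen_calc):
--     if inp == []:
--         if curr_calc == res:
--             return True
--         else:
--             return False
--     else:
--         return recur_check_result_possible(res, curr_calc * inp[0], inp[1:], '*') or recur_check_result_possible(res, curr_calc + inp[0], inp[1:], '+')
-- ===== SOURCE B (Python) =====
-- def recur_check_result_possible(res, curr_calc, inp, chosen_calc):
--     possible = {curr_calc}
--     for n in inp:
--         possible = {v * n for v in possible} | {v + n for v in possible}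
--     return res in possible
-- ===== Notes on version B (the rewrite author's own statement) =====
-- stated objective: alternative
-- what changed: Replaces the recursive short-circuiting DFS over +/* choices with an iterative breadth-first frontier: a set of all reachable partial results is updated once per number and the target is looked up at the end; it trades A's early exit for deduplication of repeated partial results.
import Mathlib
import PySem

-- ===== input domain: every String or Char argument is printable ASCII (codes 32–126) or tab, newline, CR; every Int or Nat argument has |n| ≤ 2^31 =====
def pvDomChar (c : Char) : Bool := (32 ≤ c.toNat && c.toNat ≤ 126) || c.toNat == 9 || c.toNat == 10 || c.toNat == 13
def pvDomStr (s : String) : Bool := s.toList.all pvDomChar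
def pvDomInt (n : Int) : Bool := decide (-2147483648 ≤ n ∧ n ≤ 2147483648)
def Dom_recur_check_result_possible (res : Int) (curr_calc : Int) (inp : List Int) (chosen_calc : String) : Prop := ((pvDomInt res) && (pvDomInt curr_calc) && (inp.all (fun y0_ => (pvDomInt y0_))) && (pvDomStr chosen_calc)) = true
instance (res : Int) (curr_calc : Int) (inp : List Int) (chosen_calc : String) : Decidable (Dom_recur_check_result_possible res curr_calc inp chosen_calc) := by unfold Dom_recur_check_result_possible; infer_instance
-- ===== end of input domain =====

-- B replaces A's exponential recursive DFS over the +/* choices with an iterative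
-- frontier set of all reachable partial results, deduplicating repeated partial results (objective: alternative).

-- ===== PORT A =====
def recur_check_result_possible (res : Int) (curr_calc : Int) (inp : List Int) (chosen_calc : String) : Bool :=
  match inp with
  | [] => if curr_calc == res then true else false
  | x :: rest =>
      recur_check_result_possible res (curr_calc * x) rest "*" ||
      recur_check_result_possible res (curr_calc + x) rest "+"

-- ===== PORT B =====
-- one iteration of B's loop: possible = {v*n for v in possible} | {v+n for v in possible}
def pvStep (possible : PySem.Set Int) (n : Int) : PySem.Set Int :=
  PySem.Set.union (PySem.Set.ofList (possible.map (· * n))) (PySem.Set.ofList (possible.map (· + n)))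

def recur_check_result_possible_alt (res : Int) (curr_calc : Int) (inp : List Int) (chosen_calc : String) : Bool :=
  PySem.Set.contains (inp.foldl pvStep (PySem.Set.ofList [curr_calc])) res

-- ===== PRECONDITION & SPEC =====
def Spec_recur_check_result_possible (res : Int) (curr_calc : Int) (inp : List Int) (chosen_calc : String) (out : Bool) : Prop := out = recur_check_result_possible_alt res curr_calc inp chosen_calc
instance (res : Int) (curr_calc : Int) (inp : List Int) (chosen_calc : String) (out : Bool) : Decidable (Spec_recur_check_result_possible res curr_calc inp chosen_calc out) := by unfold Spec_recur_check_result_possible; infer_instance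

-- ===== CLAIM (what is proved, stated in full; the proofs are below) =====
def Claim_equal_recur_check_result_possible : Prop := ∀ (res : Int) (curr_calc : Int) (inp : List Int) (chosen_calc : String), Dom_recur_check_result_possible res curr_calc inp chosen_calc → Spec_recur_check_result_possible res curr_calc inp chosen_calc (recur_check_result_possible res curr_calc inp chosen_calc)

-- ===== LEMMAS AND PROOFS =====

-- A ignores chosen_calc entirely
theorem recA_cc (res curr_calc : Int) (inp : List Int) (c c' : String) :
    recur_check_result_possible res curr_calc inp c = recur_check_result_possible res curr_calc inp c' := by
  induction inp generalizing curr_calc with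
  | nil => rfl
  | cons x rest ih => simp [recur_check_result_possible]

-- membership after one frontier step
theorem mem_pvStep (s : PySem.Set Int) (n v : Int) :
    v ∈ pvStep s n ↔ ∃ c ∈ s, v = c * n ∨ v = c + n := by
  simp only [pvStep, PySem.Set.mem_union, PySem.Set.mem_ofList, List.mem_map]
  constructor
  · rintro (⟨c, hc, rfl⟩ | ⟨c, hc, rfl⟩) <;> exact ⟨c, hc, by simp⟩
  · rintro ⟨c, hc, rfl | rfl⟩
    · exact Or.inl ⟨c, hc, rfl⟩
    · exact Or.inr ⟨c, hc, rfl⟩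

-- the frontier fold finds res iff A's DFS succeeds from some seed in the frontier
theorem frontier_iff (inp : List Int) (s : PySem.Set Int) (res : Int) (cc : String) :
    res ∈ inp.foldl pvStep s ↔ ∃ c ∈ s, recur_check_result_possible res c inp cc = true := by
  induction inp generalizing s cc with
  | nil =>
      simp only [List.foldl_nil, recur_check_result_possible]
      constructor
      · intro h; exact ⟨res, h, by simp⟩
      · rintro ⟨c, hc, he⟩
        have : c = res := by simpa using he
        exact this ▸ hc
  | cons x rest ih =>
      simp only [List.foldl_cons]
      rw [ih _ "*"]
      simp only [mem_pvStep, recur_check_result_possible, Bool.or_eq_true]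
      constructor
      · rintro ⟨v, ⟨c, hc, rfl | rfl⟩, hv⟩
        · exact ⟨c, hc, Or.inl ((recA_cc res (c * x) rest _ "*") ▸ hv)⟩
        · exact ⟨c, hc, Or.inr ((recA_cc res (c + x) rest _ "+") ▸ hv)⟩
      · rintro ⟨c, hc, h | h⟩
        · exact ⟨c * x, ⟨c, hc, Or.inl rfl⟩, (recA_cc res (c * x) rest "*" _) ▸ h⟩
        · exact ⟨c + x, ⟨c, hc, Or.inr rfl⟩, (recA_cc res (c + x) rest "+" _) ▸ h⟩

-- ===== VERDICT (by name: the statement is the Claim_ definition above) =====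
theorem recur_check_result_possible_spec : Claim_equal_recur_check_result_possible := by
  intro res curr_calc inp chosen_calc _
  unfold Spec_recur_check_result_possible recur_check_result_possible_alt
  have h := frontier_iff inp (PySem.Set.ofList [curr_calc]) res chosen_calc
  simp only [PySem.Set.mem_ofList, List.mem_singleton] at h
  rcases hb : recur_check_result_possible res curr_calc inp chosen_calc with _ | _
  · symm
    simp only [PySem.Set.contains, List.contains_eq_mem, decide_eq_false_iff_not]
    intro hm
    rcases h.mp hm with ⟨c, rfl, hc⟩
    simp [hb] at hc
  · symm
    simp only [PySem.Set.contains, List.contains_eq_mem, decide_eq_true_eq]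
    exact h.mpr ⟨curr_calc, rfl, hb⟩
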